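-- pv_equiv track=rewrite | github.com/Danielsa248/ATP2022 | TPC6/obras.py | distribobras
-- ===== SOURCE A (Python) =====
-- def distribobras(obras):
--     anos = {}
--
--     for myObras in obras:
--
--         if myObras[2] in anos:
--             anos[myObras[2]] = anos[myObras[2]] + 1
--
--         elif myObras[2] not in anos:
--             anos[myObras[2]] = 1
--
--     return anos
-- ===== SOURCE B (Python) =====
-- def distribobras(obras):
--     years = [w[2] for w in obras]
--     return {y: years.count(y) for y in dict.fromkeys(years)}
-- ===== Notes on version B (the rewrite author's own statement) =====
-- stated objective: simpler
-- what changed: Replaces the incremental dict-counting loop (with its redundant if/elif membership tests) by a two-phase comprehension: extract the year column, deduplicate it preserving first occurrence, and count each distinct year with list.count.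
import Mathlib
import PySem

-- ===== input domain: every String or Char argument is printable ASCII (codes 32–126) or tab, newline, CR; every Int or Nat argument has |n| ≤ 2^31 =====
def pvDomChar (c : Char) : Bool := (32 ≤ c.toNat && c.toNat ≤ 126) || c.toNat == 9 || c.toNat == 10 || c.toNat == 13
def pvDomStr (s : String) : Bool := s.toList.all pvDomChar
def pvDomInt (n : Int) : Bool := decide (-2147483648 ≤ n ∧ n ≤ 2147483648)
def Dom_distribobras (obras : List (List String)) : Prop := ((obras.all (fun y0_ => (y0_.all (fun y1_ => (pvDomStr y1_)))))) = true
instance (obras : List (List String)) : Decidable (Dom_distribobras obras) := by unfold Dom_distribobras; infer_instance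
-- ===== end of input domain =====

-- B replaces A's incremental dict-counting loop by "dedup the year column, then count each
-- distinct year" (simpler decomposition, not faster). Equivalence is on the return value.

-- ===== PORT A =====
-- A's loop: for each row, key = row[2] (IndexError if the row is shorter — excluded by Pre_);
-- 'if key in anos: anos[key] += 1  elif key not in anos: anos[key] = 1'.
def distribobras (obras : List (List String)) : List (String × Int) :=
  (obras.foldl (fun anos row =>
      match PySem.List.pyGet? row 2 with
      | some y =>
          if (PySem.Dict.get? anos y).isSome then
            PySem.Dict.insert anos y (PySem.Dict.getD anos y 0 + 1)
          else if ¬ (PySem.Dict.get? anos y).isSome then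
            PySem.Dict.insert anos y 1
          else anos
      | none => anos)   -- unreachable under Pre_ (Python raises IndexError here)
    (PySem.Dict.empty : PySem.Dict String Int)).items

-- ===== PORT B =====
-- years = [w[2] for w in obras]; {y: years.count(y) for y in dict.fromkeys(years)}
def distribobras_alt (obras : List (List String)) : List (String × Int) :=
  let years := obras.map (fun row =>
    match PySem.List.pyGet? row 2 with
    | some y => y
    | none => "")       -- unreachable under Pre_ (Python raises IndexError here)
  (PySem.List.dedup years).map (fun y => (y, (years.count y : Int)))

-- ===== PRECONDITION & SPEC =====
-- Pre_ excludes rows shorter than 3 elements, on which both Pythons raise IndexError at row[2].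
def Pre_distribobras (obras : List (List String)) : Prop :=
  ∀ row ∈ obras, 3 ≤ row.length
instance (obras : List (List String)) : Decidable (Pre_distribobras obras) := by
  unfold Pre_distribobras; infer_instance

def pvWitness_distribobras : List (List String) :=
  [["a", "b", "2000"], ["c", "d", "1999"], ["e", "f", "2000"]]

def Spec_distribobras (obras : List (List String)) (out : List (String × Int)) : Prop := out = distribobras_alt obras
instance (obras : List (List String)) (out : List (String × Int)) : Decidable (Spec_distribobras obras out) := by unfold Spec_distribobras; infer_instance

-- ===== CLAIM (what is proved, stated in full; the proofs are below) =====
def Claim_equal_distribobras : Prop := ∀ (obras : List (List String)), Dom_distribobras obras → Pre_distribobras obras → Spec_distribobras obras (distribobras obras)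

-- ===== LEMMAS AND PROOFS =====

-- under Pre_, row[2] is defined
lemma pyGet?_two_isSome (row : List String) (h : 3 ≤ row.length) :
    (PySem.List.pyGet? row 2).isSome := by
  have h2 : (2 : Int) < (row.length : Int) := by exact_mod_cast h
  simp [PySem.List.pyGet?, PySem.List.pyIdx?, h2]
  omega

-- A's if/elif body is the uniform counter step
lemma body_eq_counter_step (d : PySem.Dict String Int) (y : String) :
    (if (PySem.Dict.get? d y).isSome then
       PySem.Dict.insert d y (PySem.Dict.getD d y 0 + 1)
     else if ¬ (PySem.Dict.get? d y).isSome then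
       PySem.Dict.insert d y 1
     else d)
    = PySem.Dict.insert d y (PySem.Dict.getD d y 0 + 1) := by
  by_cases h : (PySem.Dict.get? d y).isSome
  · simp [h]
  · have hz : PySem.Dict.getD d y 0 = 0 := by
      simp [PySem.Dict.getD, Option.not_isSome_iff_eq_none.mp h]
    simp [h, hz]

-- ===== VERDICT (by name: the statement is the Claim_ definition above) =====
theorem distribobras_spec : Claim_equal_distribobras := by
  intro obras _ hpre
  unfold Spec_distribobras distribobras distribobras_alt
  set key : List String → String := fun row =>
    match PySem.List.pyGet? row 2 with
    | some y => y
    | none => "" with hkey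
  have hfold :
      obras.foldl (fun anos row =>
        match PySem.List.pyGet? row 2 with
        | some y =>
            if (PySem.Dict.get? anos y).isSome then
              PySem.Dict.insert anos y (PySem.Dict.getD anos y 0 + 1)
            else if ¬ (PySem.Dict.get? anos y).isSome then
              PySem.Dict.insert anos y 1
            else anos
        | none => anos) (PySem.Dict.empty : PySem.Dict String Int)
      = (obras.map key).foldl
          (fun d y => PySem.Dict.insert d y (PySem.Dict.getD d y 0 + 1))
          (PySem.Dict.empty : PySem.Dict String Int) := by
    rw [List.foldl_map]
    apply PySem.List.foldl_congr_mem
    intro acc row hmem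
    have hs := pyGet?_two_isSome row (hpre row hmem)
    cases hg : PySem.List.pyGet? row 2 with
    | none => simp [hg] at hs
    | some y =>
        simp only [hkey, hg]
        exact body_eq_counter_step acc y
  rw [hfold, PySem.Dict.foldl_insert_getD_add_one_eq_counter]
  rw [PySem.Dict.items_counter]
  simp [PySem.List.dedup_eq_ofList]
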